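-- pv_equiv track=rewrite | github.com/davidmiyabe/meguru-ai-agents | meguru/ui/itinerary.py | _format_inspiration_lines
-- ===== SOURCE A (Python) =====
-- from typing import Any, Dict, Iterable, List, Mapping, Tuple
--
-- def _dedupe_inspirations(cards: Iterable[Mapping[str, Any]]) -> List[Dict[str, Any]]:
--     seen: set[str] = set()
--     deduped: List[Dict[str, Any]] = []
--     for card in cards:
--         if not isinstance(card, Mapping):
--             continue
--         card_id = str(card.get("id") or card.get("title") or "").strip()
--         if not card_id or card_id in seen:
--             continue
--         payload = dict(card)
--         payload.setdefault("id", card_id)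
--         deduped.append(payload)
--         seen.add(card_id)
--     return deduped
--
-- def _format_inspiration_lines(cards: Iterable[Mapping[str, Any]]) -> str:
--     lines: List[str] = []
--     for card in _dedupe_inspirations(cards):
--         title = str(card.get("title") or card.get("id") or "Experience")
--         category = str(card.get("category") or "").strip()
--         location_hint = str(card.get("location_hint") or "").strip()
--         descriptor = f"**{title}**"
--         if category:
--             descriptor += f" · {category}"
--         if location_hint:
--             descriptor += f" — {location_hint}"
--         lines.append(f"- {descriptor}")
--     return "\n".join(lines)
-- ===== SOURCE B (Python) =====
-- from typing import Any, Iterable, Mapping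
--
--
-- def _format_inspiration_lines(cards: Iterable[Mapping[str, Any]]) -> str:
--     # Single fused pass: dedupe and format in one loop, never building payload dicts.
--     seen: set[str] = set()
--     lines: list[str] = []
--     for card in cards:
--         if not isinstance(card, Mapping):
--             continue
--         card_id = str(card.get("id") or card.get("title") or "").strip()
--         if not card_id or card_id in seen:
--             continue
--         seen.add(card_id)
--         effective_id = card["id"] if "id" in card else card_id
--         descriptor = f"**{str(card.get('title') or effective_id or 'Experience')}**"
--         category = str(card.get("category") or "").strip()
--         if category:
--             descriptor += f" · {category}"
--         location_hint = str(card.get("location_hint") or "").strip()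
--         if location_hint:
--             descriptor += f" — {location_hint}"
--         lines.append(f"- {descriptor}")
--     return "\n".join(lines)
-- ===== Notes on version B (the rewrite author's own statement) =====
-- stated objective: simpler
-- what changed: Fuses A's two passes (build deduped payload dicts, then format them) into one loop that dedupes with a seen-set and emits each markdown line directly, never materialising the intermediate payload dicts; the id-fallback of dict.setdefault is replaced by a key-presence test.
import Mathlib
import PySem

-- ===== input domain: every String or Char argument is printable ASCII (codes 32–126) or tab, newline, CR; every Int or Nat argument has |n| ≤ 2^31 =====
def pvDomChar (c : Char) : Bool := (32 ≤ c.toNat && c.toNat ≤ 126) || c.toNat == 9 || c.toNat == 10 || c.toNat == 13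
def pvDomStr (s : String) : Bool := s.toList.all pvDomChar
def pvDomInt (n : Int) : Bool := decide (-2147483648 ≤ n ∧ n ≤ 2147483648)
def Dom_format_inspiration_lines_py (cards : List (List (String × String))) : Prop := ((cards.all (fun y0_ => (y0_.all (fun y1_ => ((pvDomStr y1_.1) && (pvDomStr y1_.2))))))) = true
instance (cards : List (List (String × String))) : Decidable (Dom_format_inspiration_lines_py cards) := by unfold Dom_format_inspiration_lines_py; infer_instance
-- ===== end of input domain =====

-- B fuses A's two passes (dedupe into payload dicts, then format) into one loop that
-- formats each kept card directly; objective: simpler (no intermediate payload dicts).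

-- ===== PORT A =====
-- card.get(k) on a dict: lookup in the association list (keys of a Python dict are unique)
def pvGetA (card : List (String × String)) (k : String) : String :=
  (List.lookup k card).getD ""

-- str(card.get("id") or card.get("title") or "").strip()
def pvCardIdA (card : List (String × String)) : String :=
  PySem.Str.strip (if pvGetA card "id" ≠ "" then pvGetA card "id" else pvGetA card "title")

-- one iteration of _dedupe_inspirations' loop; dict(card) is ported as PySem.Dict.mk card
-- (exact: the keys of a Python dict are already unique)
def pvDedupeStep (st : PySem.Set String × List (PySem.Dict String String))
    (card : List (String × String)) : PySem.Set String × List (PySem.Dict String String) :=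
  let cid := pvCardIdA card
  if cid = "" ∨ PySem.Set.contains st.1 cid then st
  else (PySem.Set.add st.1 cid, st.2 ++ [(PySem.Dict.mk card).setdefault "id" cid])

def pvDedupeA (cards : List (List (String × String))) : List (PySem.Dict String String) :=
  (cards.foldl pvDedupeStep (PySem.Set.empty, [])).2

-- the body of _format_inspiration_lines' loop
def pvFmtA (payload : PySem.Dict String String) : String :=
  let title := if payload.getD "title" "" ≠ "" then payload.getD "title" ""
               else if payload.getD "id" "" ≠ "" then payload.getD "id" "" else "Experience"
  let category := PySem.Str.strip (payload.getD "category" "")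
  let locationHint := PySem.Str.strip (payload.getD "location_hint" "")
  let d1 := "**" ++ title ++ "**"
  let d2 := if category ≠ "" then d1 ++ (" · " ++ category) else d1
  let d3 := if locationHint ≠ "" then d2 ++ (" — " ++ locationHint) else d2
  "- " ++ d3

def format_inspiration_lines_py (cards : List (List (String × String))) : String :=
  PySem.Str.join "\n" ((pvDedupeA cards).map pvFmtA)

-- ===== PORT B =====
-- B's single fused loop: state = (seen, lines)
def pvStepB (st : PySem.Set String × List String) (card : List (String × String)) :
    PySem.Set String × List String :=
  let get := fun (k : String) => (List.lookup k card).getD ""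
  let cid := PySem.Str.strip (if get "id" ≠ "" then get "id" else get "title")
  if cid = "" ∨ PySem.Set.contains st.1 cid then st
  else
    let effectiveId := if (List.lookup "id" card).isSome then get "id" else cid
    let title := if get "title" ≠ "" then get "title"
                 else if effectiveId ≠ "" then effectiveId else "Experience"
    let descriptor := "**" ++ title ++ "**"
    let category := PySem.Str.strip (get "category")
    let descriptor := if category ≠ "" then descriptor ++ (" · " ++ category) else descriptor
    let locationHint := PySem.Str.strip (get "location_hint")
    let descriptor := if locationHint ≠ "" then descriptor ++ (" — " ++ locationHint) else descriptor
    (PySem.Set.add st.1 cid, st.2 ++ ["- " ++ descriptor])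

def format_inspiration_lines_py_alt (cards : List (List (String × String))) : String :=
  PySem.Str.join "\n" ((cards.foldl pvStepB (PySem.Set.empty, [])).2)

-- ===== PRECONDITION & SPEC =====
def Spec_format_inspiration_lines_py (cards : List (List (String × String))) (out : String) : Prop := out = format_inspiration_lines_py_alt cards
instance (cards : List (List (String × String))) (out : String) : Decidable (Spec_format_inspiration_lines_py cards out) := by unfold Spec_format_inspiration_lines_py; infer_instance

-- ===== CLAIM (what is proved, stated in full; the proofs are below) =====
def Claim_equal_format_inspiration_lines_py : Prop := ∀ (cards : List (List (String × String))), Dom_format_inspiration_lines_py cards → Spec_format_inspiration_lines_py cards (format_inspiration_lines_py cards)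

-- ===== LEMMAS AND PROOFS =====

-- get? on a literal dict is an association-list lookup
theorem pvGet?_mk (card : List (String × String)) (k : String) :
    (PySem.Dict.mk card).get? k = List.lookup k card := by
  induction card with
  | nil => rfl
  | cons p rest ih =>
    obtain ⟨k', v⟩ := p
    rw [PySem.Dict.get?_mk_cons]
    by_cases hk : k' = k
    · subst hk; simp [List.lookup]
    · have h2 : (k == k') = false := beq_eq_false_iff_ne.mpr (Ne.symm hk)
      simp [List.lookup, hk, h2, ih]

-- the formatted line of A's payload equals B's directly built line
theorem pvFmt_payload (card : List (String × String)) :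
    pvFmtA ((PySem.Dict.mk card).setdefault "id" (pvCardIdA card)) =
      (let get := fun (k : String) => (List.lookup k card).getD ""
       let effectiveId := if (List.lookup "id" card).isSome then get "id" else pvCardIdA card
       let title := if get "title" ≠ "" then get "title"
                    else if effectiveId ≠ "" then effectiveId else "Experience"
       let category := PySem.Str.strip (get "category")
       let locationHint := PySem.Str.strip (get "location_hint")
       let d1 := "**" ++ title ++ "**"
       let d2 := if category ≠ "" then d1 ++ (" · " ++ category) else d1
       let d3 := if locationHint ≠ "" then d2 ++ (" — " ++ locationHint) else d2
       "- " ++ d3) := by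
  by_cases hid : (List.lookup "id" card).isSome = true
  · have hcont : (PySem.Dict.mk card).contains "id" = true := by
      rw [PySem.Dict.contains_eq_isSome_get?, pvGet?_mk]; exact hid
    rw [PySem.Dict.setdefault_of_contains _ _ hcont]
    simp only [pvFmtA, PySem.Dict.getD_eq_get?_getD, pvGet?_mk, hid, if_true]
  · have hid' : (List.lookup "id" card).isSome = false := Bool.eq_false_iff.mpr hid
    have hcont : (PySem.Dict.mk card).contains "id" = false := by
      rw [PySem.Dict.contains_eq_isSome_get?, pvGet?_mk]; exact hid'
    rw [PySem.Dict.setdefault_of_not_contains _ _ hcont]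
    have eKey : ∀ k : String, k ≠ "id" →
        (((PySem.Dict.mk card).insert "id" (pvCardIdA card)).get? k).getD "" =
          (List.lookup k card).getD "" := by
      intro k hk
      rw [PySem.Dict.get?_insert_of_ne _ _ hk, pvGet?_mk]
    have eId : (((PySem.Dict.mk card).insert "id" (pvCardIdA card)).get? "id").getD "" =
        pvCardIdA card := by
      rw [PySem.Dict.get?_insert_self]; rfl
    simp [pvFmtA, PySem.Dict.getD_eq_get?_getD,
      eKey "title" (by decide), eKey "category" (by decide), eKey "location_hint" (by decide),
      hid']

-- the fused loop's lines are exactly the formatted deduped payloads, for any common state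
theorem pvLoop_eq (cards : List (List (String × String))) :
    ∀ (seen : PySem.Set String) (accA : List (PySem.Dict String String)) (accB : List String),
      accB = accA.map pvFmtA →
      (cards.foldl pvStepB (seen, accB)).2 = ((cards.foldl pvDedupeStep (seen, accA)).2).map pvFmtA := by
  induction cards with
  | nil => intro seen accA accB hacc; simpa using hacc
  | cons card rest ih =>
    intro seen accA accB hacc
    simp only [List.foldl_cons]
    by_cases hskip : pvCardIdA card = "" ∨ PySem.Set.contains seen (pvCardIdA card)
    · have hA : pvDedupeStep (seen, accA) card = (seen, accA) := by
        simp only [pvDedupeStep, hskip, if_pos]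
      have hB : pvStepB (seen, accB) card = (seen, accB) := by
        simp only [pvCardIdA, pvGetA] at hskip
        simp only [pvStepB, hskip, if_pos]
      rw [hA, hB]; exact ih seen accA accB hacc
    · have hA : pvDedupeStep (seen, accA) card =
          (PySem.Set.add seen (pvCardIdA card), accA ++ [(PySem.Dict.mk card).setdefault "id" (pvCardIdA card)]) := by
        simp only [pvDedupeStep, hskip, if_neg, not_false_iff]
      have hB : pvStepB (seen, accB) card =
          (PySem.Set.add seen (pvCardIdA card),
           accB ++ [pvFmtA ((PySem.Dict.mk card).setdefault "id" (pvCardIdA card))]) := by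
        rw [pvFmt_payload card]
        simp only [pvCardIdA, pvGetA] at hskip
        simp only [pvStepB, pvCardIdA, pvGetA, hskip, if_neg, not_false_iff]
      rw [hA, hB]
      exact ih _ _ _ (by simp [hacc])

-- ===== VERDICT (by name: the statement is the Claim_ definition above) =====
theorem format_inspiration_lines_py_spec : Claim_equal_format_inspiration_lines_py := by
  intro cards _
  unfold Spec_format_inspiration_lines_py format_inspiration_lines_py format_inspiration_lines_py_alt pvDedupeA
  rw [pvLoop_eq cards PySem.Set.empty [] [] rfl]
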